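-- pv_equiv track=rewrite | github.com/mahditaharb-maker/myfiles | python1/H (2).py | find_smallest_p_a_neg1
-- ===== SOURCE A (Python) =====
-- from math import gcd
--
-- def is_prime(n):
--     if n <= 1:
--         return False
--     if n <= 3:
--         return True
--     if n % 2 == 0 or n % 3 == 0:
--         return False
--     i = 5
--     while i * i <= n:
--         if n % i == 0 or n % (i + 2) == 0:
--             return False
--         i += 6
--     return True
--
-- def mod_pow_2(n, m):
--     result = 1
--     base = 2 % m
--     while n > 0:
--         if n % 2 == 1:
--             result = (result * base) % m
--         base = (base * base) % m
--         n //= 2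
--     return result
--
-- def find_smallest_p_a_neg1(n, p_limit=1000000, a_limit=100):
--     for p in range(2, p_limit):
--         if not is_prime(p):
--             continue
--         for a in range(1, a_limit + 1):
--             modulus = p ** a
--             if gcd(2, modulus) != 1:
--                 continue
--             if (mod_pow_2(n, modulus) + 1) % modulus == 0:
--                 return p, a
--     return None, None
-- ===== SOURCE B (Python) =====
-- # B: single pass over odd candidates, one modular check per prime.
-- # Key fact: 2**n = -1 (mod p**a) implies 2**n = -1 (mod p), so the smallest
-- # exponent that can ever succeed is a = 1; the whole inner loop over a collapses
-- # to one check per prime, and even candidates (p = 2 included) can never succeed.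
-- def is_prime(n):
--     if n <= 1:
--         return False
--     if n <= 3:
--         return True
--     if n % 2 == 0 or n % 3 == 0:
--         return False
--     i = 5
--     while i * i <= n:
--         if n % i == 0 or n % (i + 2) == 0:
--             return False
--         i += 6
--     return True
--
-- def pow2_mod(n, m):
--     # 2**n mod m for n >= 0 (empty product for n <= 0), by recursive squaring
--     if n <= 0:
--         return 1 % m
--     h = pow2_mod(n // 2, m)
--     r = h * h % m
--     if n % 2 == 1:
--         r = r * 2 % m
--     return r
--
-- def find_smallest_p_a_neg1(n, p_limit=1000000, a_limit=100):
--     if a_limit < 1: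
--         return None, None
--     for p in range(3, p_limit, 2):
--         if is_prime(p) and (pow2_mod(n, p) + 1) % p == 0:
--             return p, 1
--     return None, None
-- ===== Notes on version B (the rewrite author's own statement) =====
-- stated objective: faster
-- what changed: B drops A's inner loop over exponents a entirely (2^n = -1 mod p^a forces 2^n = -1 mod p, so only a = 1 can be the first hit), scans only odd candidates starting at 3 (even moduli never pass A's gcd test), and computes 2^n mod p by recursive squaring instead of A's bottom-up loop, doing one small modular check per prime instead of a_limit modpows with moduli up to p^a_limit.
import Mathlib
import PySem

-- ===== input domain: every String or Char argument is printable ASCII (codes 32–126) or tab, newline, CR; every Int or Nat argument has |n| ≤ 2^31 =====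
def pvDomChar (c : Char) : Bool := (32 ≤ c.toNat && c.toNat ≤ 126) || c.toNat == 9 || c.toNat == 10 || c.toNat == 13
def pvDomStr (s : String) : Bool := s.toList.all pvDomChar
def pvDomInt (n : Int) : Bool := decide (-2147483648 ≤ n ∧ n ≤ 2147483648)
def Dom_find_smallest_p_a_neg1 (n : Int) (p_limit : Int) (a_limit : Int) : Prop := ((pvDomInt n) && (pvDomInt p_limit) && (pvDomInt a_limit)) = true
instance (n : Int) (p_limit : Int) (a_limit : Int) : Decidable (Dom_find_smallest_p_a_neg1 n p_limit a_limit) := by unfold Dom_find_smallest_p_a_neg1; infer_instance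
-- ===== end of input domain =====

-- B removes A's inner loop over exponents a (2^n ≡ -1 mod p^a forces 2^n ≡ -1 mod p, so only
-- a = 1 can be the first hit), scans odd candidates only, and uses recursive-squaring modpow.


-- ===== PORT A =====
-- shared helper: the module-level `is_prime` both Pythons use
-- (`i = 5; while i * i <= n: ...; i += 6`)
def pvIsPrimeLoop (nn : Int) (i : Int) : Bool :=
  if i * i ≤ nn then
    if PySem.Int.mod nn i == 0 || PySem.Int.mod nn (i + 2) == 0 then false
    else pvIsPrimeLoop nn (i + 6)
  else true
termination_by (nn + 1 - i).toNat
decreasing_by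
  have hle : i ≤ nn := by nlinarith [sq_nonneg (i - 1)]
  omega

def pvIsPrime (nn : Int) : Bool :=
  if nn ≤ 1 then false
  else if nn ≤ 3 then true
  else if PySem.Int.mod nn 2 == 0 || PySem.Int.mod nn 3 == 0 then false
  else pvIsPrimeLoop nn 5

-- A's `mod_pow_2`: bottom-up binary exponentiation (`while n > 0`)
def pvModPowLoop (n result base m : Int) : Int :=
  if 0 < n then
    pvModPowLoop (PySem.Int.floordiv n 2)
      (if PySem.Int.mod n 2 == 1 then PySem.Int.mod (result * base) m else result)
      (PySem.Int.mod (base * base) m) m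
  else result
termination_by n.toNat
decreasing_by
  rw [PySem.Int.floordiv_eq_ediv_of_pos (by omega : (0:Int) < 2)]
  omega

def pvModPow2 (n m : Int) : Int := pvModPowLoop n 1 (PySem.Int.mod 2 m) m

-- A's inner `for a in range(1, a_limit + 1)` with early return
-- (`p ** a`: every a drawn from range(1, …) is ≥ 1, so `p ^ a.toNat` is Python's int power)
def pvInnerA (n p : Int) : List Int → Option (Int × Int)
  | [] => none
  | a :: rest =>
    let modulus := p ^ a.toNat
    if Int.gcd 2 modulus ≠ 1 then pvInnerA n p rest
    else if PySem.Int.mod (pvModPow2 n modulus + 1) modulus == 0 then some (p, a)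
    else pvInnerA n p rest

-- A's outer `for p in range(2, p_limit)` with early return
def pvOuterA (n a_limit : Int) : List Int → Option (Int × Int)
  | [] => none
  | p :: rest =>
    if !pvIsPrime p then pvOuterA n a_limit rest
    else match pvInnerA n p (PySem.List.pyRange 1 (a_limit + 1) 1) with
      | some r => some r
      | none => pvOuterA n a_limit rest

def find_smallest_p_a_neg1 (n : Int) (p_limit : Int) (a_limit : Int) : Option Int × Option Int :=
  match pvOuterA n a_limit (PySem.List.pyRange 2 p_limit 1) with
  | some (p, a) => (some p, some a)
  | none => (none, none)

-- ===== PORT B =====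
-- B's `pow2_mod`: top-down recursive squaring
def pvPow2Mod (n m : Int) : Int :=
  if 0 < n then
    let h := pvPow2Mod (PySem.Int.floordiv n 2) m
    let r := PySem.Int.mod (h * h) m
    if PySem.Int.mod n 2 == 1 then PySem.Int.mod (r * 2) m else r
  else PySem.Int.mod 1 m
termination_by n.toNat
decreasing_by
  rw [PySem.Int.floordiv_eq_ediv_of_pos (by omega : (0:Int) < 2)]
  omega

-- B's `for p in range(3, p_limit, 2): if cond: return p, 1` is a first-match scan
def find_smallest_p_a_neg1_alt (n : Int) (p_limit : Int) (a_limit : Int) : Option Int × Option Int :=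
  if a_limit < 1 then (none, none)
  else
    match (PySem.List.pyRange 3 p_limit 2).find?
        (fun p => pvIsPrime p && PySem.Int.mod (pvPow2Mod n p + 1) p == 0) with
    | some p => (some p, some 1)
    | none => (none, none)

-- ===== PRECONDITION & SPEC =====
def Spec_find_smallest_p_a_neg1 (n : Int) (p_limit : Int) (a_limit : Int) (out : Option Int × Option Int) : Prop := out = find_smallest_p_a_neg1_alt n p_limit a_limit
instance (n : Int) (p_limit : Int) (a_limit : Int) (out : Option Int × Option Int) : Decidable (Spec_find_smallest_p_a_neg1 n p_limit a_limit out) := by unfold Spec_find_smallest_p_a_neg1; infer_instance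

-- ===== CLAIM (what is proved, stated in full; the proofs are below) =====
def Claim_equal_find_smallest_p_a_neg1 : Prop := ∀ (n : Int) (p_limit : Int) (a_limit : Int), Dom_find_smallest_p_a_neg1 n p_limit a_limit → Spec_find_smallest_p_a_neg1 n p_limit a_limit (find_smallest_p_a_neg1 n p_limit a_limit)

-- ===== LEMMAS AND PROOFS =====
theorem modPowLoop_correct (e : Nat) : ∀ (r b m : Int), 1 < m → 0 ≤ r → r < m → 0 ≤ b → b < m →
    pvModPowLoop (e : Int) r b m = (r * b ^ e) % m := by
  induction e using Nat.strong_induction_on with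
  | _ e IH =>
    intro r b m hm hr0 hrm hb0 hbm
    rw [pvModPowLoop]
    by_cases he : 0 < e
    · have hepos : (0:Int) < (e:Int) := by exact_mod_cast he
      rw [if_pos hepos,
          PySem.Int.floordiv_eq_ediv_of_pos (by omega : (0:Int) < 2),
          PySem.Int.mod_eq_emod_of_pos (by omega : (0:Int) < 2)]
      have hdiv : (e:Int) / 2 = ((e / 2 : Nat) : Int) := by omega
      have hmod : (e:Int) % 2 = ((e % 2 : Nat) : Int) := by omega
      rw [hdiv, hmod]
      have hm0 : m ≠ 0 := by omega
      have hmpos : (0:Int) < m := by omega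
      have hlt : e / 2 < e := by omega
      have hbb0 : 0 ≤ (b * b) % m := Int.emod_nonneg _ hm0
      have hbbm : (b * b) % m < m := Int.emod_lt_of_pos _ hmpos
      simp only [PySem.Int.mod_eq_emod_of_pos hmpos]
      by_cases hpar : e % 2 = 1
      · rw [hpar]
        simp only [Nat.cast_one, beq_self_eq_true, if_true]
        rw [IH (e / 2) hlt _ _ _ hm (Int.emod_nonneg _ hm0) (Int.emod_lt_of_pos _ hmpos) hbb0 hbbm]
        have he2 : e = 2 * (e / 2) + 1 := by omega
        have h1 : (r * b) % m ≡ r * b [ZMOD m] := Int.emod_emod_of_dvd _ dvd_rfl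
        have h2 : ((b * b) % m) ^ (e / 2) ≡ (b * b) ^ (e / 2) [ZMOD m] :=
          Int.ModEq.pow _ (Int.emod_emod_of_dvd _ dvd_rfl)
        have h4 : (r * b) * (b * b) ^ (e / 2) = r * b ^ e := by
          conv_rhs => rw [he2]
          rw [pow_succ, pow_mul]; ring
        rw [← h4]; exact h1.mul h2
      · have hpar0 : e % 2 = 0 := by omega
        rw [hpar0]
        simp only [Nat.cast_zero]
        rw [if_neg (by decide)]
        rw [IH (e / 2) hlt _ _ _ hm hr0 hrm hbb0 hbbm]
        have he2 : e = 2 * (e / 2) := by omega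
        have h2 : ((b * b) % m) ^ (e / 2) ≡ (b * b) ^ (e / 2) [ZMOD m] :=
          Int.ModEq.pow _ (Int.emod_emod_of_dvd _ dvd_rfl)
        have h4 : r * (b * b) ^ (e / 2) = r * b ^ e := by
          conv_rhs => rw [he2]
          rw [pow_mul]; ring
        rw [← h4]; exact (Int.ModEq.refl r).mul h2
    · have : ¬ (0:Int) < (e:Int) := by exact_mod_cast he
      rw [if_neg this]
      have : e = 0 := by omega
      subst this
      simp [Int.emod_eq_of_lt hr0 hrm]

theorem modPow2_eq (n m : Int) (hm : 1 < m) : pvModPow2 n m = 2 ^ n.toNat % m := by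
  have hmpos : (0:Int) < m := by omega
  have hm0 : m ≠ 0 := by omega
  rw [pvModPow2, PySem.Int.mod_eq_emod_of_pos hmpos]
  by_cases hn : 0 < n
  · have hcast : n = (n.toNat : Int) := by omega
    rw [hcast, modPowLoop_correct n.toNat 1 (2 % m) m hm (by omega) hm
        (Int.emod_nonneg _ hm0) (Int.emod_lt_of_pos _ hmpos), one_mul]
    exact Int.ModEq.pow _ (Int.emod_emod_of_dvd _ dvd_rfl)
  · rw [pvModPowLoop, if_neg hn]
    have : n.toNat = 0 := by omega
    rw [this, pow_zero]
    exact (Int.emod_eq_of_lt (by omega) hm).symm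

theorem pow2Mod_aux (e : Nat) : ∀ (n m : Int), n.toNat = e → 1 < m → pvPow2Mod n m = 2 ^ e % m := by
  induction e using Nat.strong_induction_on with
  | _ e IH =>
    intro n m hn hm
    have hmpos : (0:Int) < m := by omega
    have hm0 : m ≠ 0 := by omega
    rw [pvPow2Mod]
    by_cases hpos : 0 < n
    · rw [if_pos hpos, PySem.Int.floordiv_eq_ediv_of_pos (by omega : (0:Int) < 2),
          PySem.Int.mod_eq_emod_of_pos (by omega : (0:Int) < 2)]
      have he : 0 < e := by omega
      have hhalf : (n / 2).toNat = e / 2 := by omega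
      rw [IH (e / 2) (by omega) (n / 2) m hhalf hm]
      simp only [PySem.Int.mod_eq_emod_of_pos hmpos]
      have hsq : (2 ^ (e / 2) % m) * (2 ^ (e / 2) % m) % m = 2 ^ (2 * (e / 2)) % m := by
        have h1 : (2:Int) ^ (e / 2) % m ≡ 2 ^ (e / 2) [ZMOD m] :=
          Int.emod_emod_of_dvd _ dvd_rfl
        have this := h1.mul h1
        rw [← pow_add] at this
        have harith : e / 2 + e / 2 = 2 * (e / 2) := by omega
        rw [harith] at this
        exact this
      by_cases hpar : n % 2 = 1
      · rw [hpar]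
        simp only [beq_self_eq_true, if_true, hsq]
        have hodd : e = 2 * (e / 2) + 1 := by omega
        have : (2 ^ (2 * (e / 2)) % m) * 2 % m = 2 ^ e % m := by
          have h1 : (2:Int) ^ (2 * (e / 2)) % m ≡ 2 ^ (2 * (e / 2)) [ZMOD m] :=
            Int.emod_emod_of_dvd _ dvd_rfl
          have h2 := h1.mul (Int.ModEq.refl (2:Int))
          rw [← pow_succ] at h2
          rw [← hodd] at h2
          exact h2
        rw [this]
      · have hpar0 : n % 2 = 0 := by omega
        rw [hpar0]
        simp only [show ((0:Int) == 1) = false from rfl, Bool.false_eq_true, if_false, hsq]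
        have heven : e = 2 * (e / 2) := by omega
        rw [← heven]
    · rw [if_neg hpos, PySem.Int.mod_eq_emod_of_pos hmpos]
      have : e = 0 := by omega
      rw [this, pow_zero]

theorem pow2Mod_eq (n m : Int) (hm : 1 < m) : pvPow2Mod n m = 2 ^ n.toNat % m :=
  pow2Mod_aux n.toNat n m rfl hm

theorem check_iff (n m : Int) (hm : 1 < m) :
    (PySem.Int.mod (2 ^ n.toNat % m + 1) m == 0) = decide (m ∣ 2 ^ n.toNat + 1) := by
  have hmpos : (0:Int) < m := by omega
  rw [PySem.Int.mod_eq_emod_of_pos hmpos]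
  have hme : (2:Int) ^ n.toNat % m ≡ 2 ^ n.toNat [ZMOD m] := Int.emod_emod_of_dvd _ dvd_rfl
  have h1 : ((2:Int) ^ n.toNat % m + 1) % m = (2 ^ n.toNat + 1) % m := hme.add_right 1
  rw [h1]
  by_cases hd : m ∣ 2 ^ n.toNat + 1
  · simp [hd, Int.emod_eq_zero_of_dvd]
  · have : (2 ^ n.toNat + 1) % m ≠ 0 := fun h => hd (Int.dvd_of_emod_eq_zero h)
    simp [hd, this]

theorem gcd_two_odd (m : Int) (h : ¬ (2 ∣ m)) : Int.gcd 2 m = 1 := by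
  have hdvd : (Int.gcd 2 m : Int) ∣ 2 := Int.gcd_dvd_left 2 m
  have h2 : Int.gcd 2 m ∣ 2 := by exact_mod_cast hdvd
  rcases (Nat.dvd_prime Nat.prime_two).mp h2 with hg | hg
  · exact hg
  · exfalso
    apply h
    have := Int.gcd_dvd_right 2 m
    rw [hg] at this
    exact_mod_cast this

theorem odd_pow_not_two_dvd (p : Int) (k : Nat) (hodd : ¬ (2 ∣ p)) : ¬ ((2:Int) ∣ p ^ k) :=
  fun h => hodd (Int.prime_two.dvd_of_dvd_pow h)

theorem gcd_two_even_ne_one (m : Int) (h : 2 ∣ m) : Int.gcd 2 m ≠ 1 := by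
  intro hg
  have hco : IsCoprime (2:Int) m := Int.isCoprime_iff_gcd_eq_one.mpr hg
  have : IsUnit (2:Int) := hco.isUnit_of_dvd' dvd_rfl h
  rw [Int.isUnit_iff] at this
  omega

theorem one_lt_pow_int (p : Int) (k : Nat) (hp : 1 < p) (hk : k ≠ 0) : 1 < p ^ k :=
  one_lt_pow₀ hp hk

theorem inner_none (n p : Int) (hp : 3 ≤ p) (hodd : ¬ (2 ∣ p))
    (hnd : ¬ (p ∣ 2 ^ n.toNat + 1)) :
    ∀ l : List Int, (∀ a ∈ l, 1 ≤ a) → pvInnerA n p l = none := by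
  intro l
  induction l with
  | nil => intro _; rfl
  | cons a rest IH =>
    intro hmem
    have ha : 1 ≤ a := hmem a (List.mem_cons_self)
    have hk0 : a.toNat ≠ 0 := by omega
    have hgcd : Int.gcd 2 (p ^ a.toNat) = 1 :=
      gcd_two_odd _ (odd_pow_not_two_dvd p a.toNat hodd)
    have hm1 : (1:Int) < p ^ a.toNat := one_lt_pow_int p a.toNat (by omega) hk0
    have hnd' : ¬ ((p ^ a.toNat : Int) ∣ 2 ^ n.toNat + 1) :=
      fun h => hnd (dvd_trans (dvd_pow_self p hk0) h)
    rw [pvInnerA]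
    simp only [hgcd, ne_eq, not_true_eq_false, if_false,
      modPow2_eq n _ hm1, check_iff n _ hm1, hnd', decide_false]
    exact IH (fun x hx => hmem x (List.mem_cons_of_mem _ hx))

theorem inner_two (n : Int) :
    ∀ l : List Int, (∀ a ∈ l, 1 ≤ a) → pvInnerA n 2 l = none := by
  intro l
  induction l with
  | nil => intro _; rfl
  | cons a rest IH =>
    intro hmem
    have ha : 1 ≤ a := hmem a (List.mem_cons_self)
    have hk0 : a.toNat ≠ 0 := by omega
    have hgcd : Int.gcd 2 ((2:Int) ^ a.toNat) ≠ 1 :=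
      gcd_two_even_ne_one _ (dvd_pow_self 2 hk0)
    rw [pvInnerA]
    simp only [hgcd, ne_eq, not_false_eq_true, if_true]
    exact IH (fun x hx => hmem x (List.mem_cons_of_mem _ hx))

theorem inner_hit (n p a_limit : Int) (hp : 3 ≤ p) (hodd : ¬ (2 ∣ p))
    (hd : p ∣ 2 ^ n.toNat + 1) (ha : 1 ≤ a_limit) :
    pvInnerA n p (PySem.List.pyRange 1 (a_limit + 1) 1) = some (p, 1) := by
  rw [PySem.List.pyRange_one_cons (by omega : (1:Int) < a_limit + 1), pvInnerA]
  have hgcd : Int.gcd 2 p = 1 := gcd_two_odd _ hodd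
  have hmp : (1:Int) < p := by omega
  simp only [Int.toNat_one, pow_one, hgcd, ne_eq, not_true_eq_false, if_false,
    modPow2_eq n _ hmp, check_iff n _ hmp, hd, decide_true, if_true]

theorem prime_even_eq_two (p : Int) (h2 : 2 ≤ p) (heven : p % 2 = 0)
    (hpr : pvIsPrime p = true) : p = 2 := by
  by_contra hne
  have h4 : 4 ≤ p := by omega
  rw [pvIsPrime, if_neg (by omega), if_neg (by omega)] at hpr
  rw [if_pos] at hpr
  · exact Bool.false_ne_true hpr
  · rw [PySem.Int.mod_eq_emod_of_pos (by omega : (0:Int) < 2)]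
    simp [heven]

theorem pyRange_one_all_ge (a b : Int) : ∀ p ∈ PySem.List.pyRange a b 1, a ≤ p := by
  intro p hp
  exact ((PySem.List.mem_pyRange_one).mp hp).1

theorem one_le_of_mem_range_a (a_limit : Int) :
    ∀ x ∈ PySem.List.pyRange 1 (a_limit + 1) 1, 1 ≤ x :=
  pyRange_one_all_ge 1 (a_limit + 1)

theorem outerA_eq_find (n a_limit : Int) (ha : 1 ≤ a_limit) :
    ∀ l : List Int, (∀ p ∈ l, 2 ≤ p) →
    pvOuterA n a_limit l =
      (l.find? (fun p => pvIsPrime p && PySem.Int.mod p 2 == 1 &&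
        decide ((p : Int) ∣ 2 ^ n.toNat + 1))).map (fun p => (p, 1)) := by
  intro l
  induction l with
  | nil => intro _; rfl
  | cons p rest IH =>
    intro hmem
    have hp2 : 2 ≤ p := hmem p List.mem_cons_self
    have hrest := fun x hx => hmem x (List.mem_cons_of_mem _ hx)
    rw [pvOuterA, List.find?_cons]
    rw [PySem.Int.mod_eq_emod_of_pos (by omega : (0:Int) < 2)]
    cases hpr : pvIsPrime p with
    | false =>
      simp only [Bool.not_false, if_true, Bool.false_and]
      exact IH hrest
    | true =>
      simp only [Bool.not_true, Bool.true_and]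
      by_cases hparity : p % 2 = 1
      · have hodd : ¬ ((2:Int) ∣ p) := by omega
        have hp3 : 3 ≤ p := by omega
        by_cases hX : p ∣ 2 ^ n.toNat + 1
        · rw [inner_hit n p a_limit hp3 hodd hX ha]
          simp [hparity, hX]
        · rw [inner_none n p hp3 hodd hX _ (one_le_of_mem_range_a a_limit)]
          simp only [hparity, beq_self_eq_true, Bool.true_and, hX, decide_false]
          exact IH hrest
      · have heven : p % 2 = 0 := by omega
        have hp2eq : p = 2 := prime_even_eq_two p hp2 heven hpr
        subst hp2eq
        rw [inner_two n _ (one_le_of_mem_range_a a_limit)]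
        simp only [show ((2:Int) % 2 == 1) = false by decide, Bool.false_and]
        exact IH hrest

theorem outerA_none (n a_limit : Int) (ha : a_limit < 1) :
    ∀ l : List Int, pvOuterA n a_limit l = none := by
  intro l
  induction l with
  | nil => rfl
  | cons p rest IH =>
    rw [pvOuterA, PySem.List.pyRange_one_eq_nil (by omega : a_limit + 1 ≤ 1)]
    cases pvIsPrime p <;> simp [pvInnerA, IH]

theorem pyRange_two_nil (a b : Int) (h : b ≤ a) : PySem.List.pyRange a b 2 = [] := by
  rw [PySem.List.pyRange_of_pos a b (by omega : (0:Int) < 2), if_neg (by omega)]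
  rfl

theorem pyRange_two_cons (a b : Int) (h : a < b) :
    PySem.List.pyRange a b 2 = a :: PySem.List.pyRange (a + 2) b 2 := by
  rw [PySem.List.pyRange_of_pos a b (by omega : (0:Int) < 2),
      PySem.List.pyRange_of_pos (a + 2) b (by omega : (0:Int) < 2)]
  rw [if_pos h]
  by_cases h2 : a + 2 < b
  · rw [if_pos h2]
    have harith : ((b - a + 2 - 1) / 2).toNat = ((b - (a + 2) + 2 - 1) / 2).toNat + 1 := by omega
    rw [harith, List.range_succ_eq_map]
    simp only [List.map_cons, List.map_map]
    congr 1
    · push_cast; ring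
    apply List.map_congr_left
    intro k _
    simp only [Function.comp_apply]
    push_cast
    ring
  · rw [if_neg h2]
    have harith : ((b - a + 2 - 1) / 2).toNat = 1 := by omega
    rw [harith]
    simp

theorem range_filter_odd_aux (N : Nat) : ∀ a b : Int, (b - a).toNat ≤ N → a % 2 = 1 →
    (PySem.List.pyRange a b 1).filter (fun p => PySem.Int.mod p 2 == 1)
      = PySem.List.pyRange a b 2 := by
  induction N using Nat.strong_induction_on with
  | _ N IH =>
    intro a b hN hodd
    by_cases hab : a < b
    · rw [PySem.List.pyRange_one_cons hab, pyRange_two_cons a b hab]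
      rw [List.filter_cons_of_pos (by
        rw [PySem.Int.mod_eq_emod_of_pos (by omega : (0:Int) < 2)]; simp [hodd])]
      congr 1
      by_cases hab2 : a + 1 < b
      · rw [PySem.List.pyRange_one_cons hab2]
        rw [List.filter_cons_of_neg (by
          rw [PySem.Int.mod_eq_emod_of_pos (by omega : (0:Int) < 2)]
          simp; omega)]
        have hstep : a + 1 + 1 = a + 2 := by ring
        rw [hstep]
        exact IH ((b - (a + 2)).toNat) (by omega) (a + 2) b (by omega) (by omega)
      · rw [PySem.List.pyRange_one_eq_nil (by omega : b ≤ a + 1),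
            pyRange_two_nil (a + 2) b (by omega)]
        rfl
    · rw [PySem.List.pyRange_one_eq_nil (by omega : b ≤ a), pyRange_two_nil a b (by omega)]
      rfl

theorem range_filter_odd (L : Int) :
    (PySem.List.pyRange 2 L 1).filter (fun p => PySem.Int.mod p 2 == 1)
      = PySem.List.pyRange 3 L 2 := by
  by_cases h : 2 < L
  · rw [PySem.List.pyRange_one_cons (by omega : (2:Int) < L)]
    rw [List.filter_cons_of_neg (by decide)]
    exact range_filter_odd_aux (L - 3).toNat 3 L (by omega) (by omega)
  · rw [PySem.List.pyRange_one_eq_nil (by omega : L ≤ 2), pyRange_two_nil 3 L (by omega)]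
    rfl

theorem find?_filter_of_imp {Q R : Int → Bool} : ∀ l : List Int,
    (∀ x ∈ l, Q x = true → R x = true) →
    l.find? Q = (l.filter R).find? Q := by
  intro l
  induction l with
  | nil => intro _; rfl
  | cons x rest IH =>
    intro h
    have hrest := fun y hy => h y (List.mem_cons_of_mem _ hy)
    cases hQ : Q x with
    | true =>
      have hR : R x = true := h x List.mem_cons_self hQ
      rw [List.filter_cons_of_pos hR, List.find?_cons, List.find?_cons, hQ]
    | false =>
      cases hR : R x with
      | true =>
        rw [List.filter_cons_of_pos hR, List.find?_cons, List.find?_cons, hQ]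
        exact IH hrest
      | false =>
        rw [List.filter_cons_of_neg (by simp [hR]), List.find?_cons, hQ]
        exact IH hrest

theorem find?_congr_mem {Q R : Int → Bool} : ∀ l : List Int,
    (∀ x ∈ l, Q x = R x) → l.find? Q = l.find? R := by
  intro l
  induction l with
  | nil => intro _; rfl
  | cons x rest IH =>
    intro h
    rw [List.find?_cons, List.find?_cons, h x List.mem_cons_self]
    cases R x
    · exact IH (fun y hy => h y (List.mem_cons_of_mem _ hy))
    · rfl

theorem main_eq (n p_limit a_limit : Int) :
    find_smallest_p_a_neg1 n p_limit a_limit = find_smallest_p_a_neg1_alt n p_limit a_limit := by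
  rw [find_smallest_p_a_neg1, find_smallest_p_a_neg1_alt]
  by_cases ha : a_limit < 1
  · rw [if_pos ha, outerA_none n a_limit ha]
  · rw [if_neg ha]
    rw [outerA_eq_find n a_limit (by omega) _ (pyRange_one_all_ge 2 p_limit)]
    rw [find?_filter_of_imp (PySem.List.pyRange 2 p_limit 1)
        (R := fun p => PySem.Int.mod p 2 == 1) (by intro x _ hQ; simp at hQ; simp [hQ.1.2])]
    rw [range_filter_odd p_limit]
    rw [find?_congr_mem (R := fun p => pvIsPrime p && (PySem.Int.mod (pvPow2Mod n p + 1) p == 0))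
      (PySem.List.pyRange 3 p_limit 2) (by
      intro x hx
      have hm := (PySem.List.mem_pyRange_iff_of_pos (by omega : (0:Int) < 2) x).mp hx
      have hx3 : 3 ≤ x := hm.1
      have hxodd : x % 2 = 1 := by
        obtain ⟨k, hk⟩ := hm.2.2
        omega
      have hx1 : (1:Int) < x := by omega
      show (pvIsPrime x && PySem.Int.mod x 2 == 1 && decide (x ∣ 2 ^ n.toNat + 1))
        = (pvIsPrime x && (PySem.Int.mod (pvPow2Mod n x + 1) x == 0))
      rw [pow2Mod_eq n x hx1, check_iff n x hx1,
          PySem.Int.mod_eq_emod_of_pos (by omega : (0:Int) < 2), hxodd]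
      simp)]
    cases hF : (PySem.List.pyRange 3 p_limit 2).find?
        (fun p => pvIsPrime p && (PySem.Int.mod (pvPow2Mod n p + 1) p == 0)) <;> simp

-- ===== VERDICT (by name: the statement is the Claim_ definition above) =====
theorem find_smallest_p_a_neg1_spec : Claim_equal_find_smallest_p_a_neg1 := by
  intro n p_limit a_limit _
  unfold Spec_find_smallest_p_a_neg1
  exact main_eq n p_limit a_limit
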